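-- pv_equiv track=rewrite | github.com/MaritxuExe/HashiGame | solver.py | construct_edges
-- ===== SOURCE A (Python) =====
-- def vertical_bridges(i, j, nodes):
--     xi, yi = nodes[i]
--     xj, yj = nodes[j]
--
--     if xi != xj:
--         return False
--
--     for k in nodes:
--         xk, yk = k
--
--         if k == nodes[i] or k == nodes[j]:
--             continue
--
--         left = min(yi, yj)
--         right = max(yi, yj)
--
--         #xi == xj
--         if xk == xi and (left < yk < right):
--             return False
--
--     return True
--
-- def horizontal_bridges(i, j, nodes):
--     xi, yi = nodes[i]
--     xj, yj = nodes[j]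
--
--     if yi != yj:
--         return False
--
--     for k in nodes:
--         xk, yk = k
--
--         if k == nodes[i] or k == nodes[j]:
--             continue
--
--         left = min(xi, xj)
--         right = max(xi, xj)
--
--         #xi == xj
--         if yk == yi and (left < xk < right):
--             return False
--
--     return True
--
-- def construct_edges(nodes):
--     """
--     Construir la lista de aristas posibles (puentes válidos). SE DEBE
--     LLAMAR "edges". Las aristas van del índice i de una isla nodes[i] al
--     índice j de otra nodes[j]. Siguiendo el Ejemplo 1, debes devolver la lista
--     edges =  [[0, 1], [0, 2], [1, 4], [2, 3], [3, 4], [3, 5], [4, 6], [5, 6]].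
--     """
--
--     edges = []
--     n = len(nodes)
--
--     for i in range(n):
--         for j in range(i + 1, n):
--             if horizontal_bridges(i, j, nodes) or vertical_bridges(i, j, nodes):
--                 edges.append([i, j])
--
--     return edges
-- ===== SOURCE B (Python) =====
-- def construct_edges(nodes):
--     # Index built once: sorted distinct coordinates per row and per column give
--     # the set of unobstructed neighbouring island pairs; the pair loop then
--     # tests adjacency in O(1) instead of rescanning all islands per pair.
--     rows = {}
--     cols = {}
--     for x, y in nodes:
--         rows.setdefault(y, set()).add(x)
--         cols.setdefault(x, set()).add(y)
--     adj = set()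
--     for y, xs in rows.items():
--         sx = sorted(xs)
--         for a, b in zip(sx, sx[1:]):
--             adj.add(((a, y), (b, y)))
--     for x, ys in cols.items():
--         sy = sorted(ys)
--         for a, b in zip(sy, sy[1:]):
--             adj.add(((x, a), (x, b)))
--     edges = []
--     n = len(nodes)
--     for i in range(n):
--         vi = tuple(nodes[i])
--         for j in range(i + 1, n):
--             vj = tuple(nodes[j])
--             if vi == vj or (min(vi, vj), max(vi, vj)) in adj:
--                 edges.append([i, j])
--     return edges
-- ===== Notes on version B (the rewrite author's own statement) =====
-- stated objective: faster
-- what changed: A rescans every island for each candidate pair (O(n^3)); B builds the set of unobstructed neighbouring island pairs once by sorting the distinct coordinates of each row and column and taking consecutive entries, so the pair loop tests connectivity with a single O(1) set lookup.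
import Mathlib
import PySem

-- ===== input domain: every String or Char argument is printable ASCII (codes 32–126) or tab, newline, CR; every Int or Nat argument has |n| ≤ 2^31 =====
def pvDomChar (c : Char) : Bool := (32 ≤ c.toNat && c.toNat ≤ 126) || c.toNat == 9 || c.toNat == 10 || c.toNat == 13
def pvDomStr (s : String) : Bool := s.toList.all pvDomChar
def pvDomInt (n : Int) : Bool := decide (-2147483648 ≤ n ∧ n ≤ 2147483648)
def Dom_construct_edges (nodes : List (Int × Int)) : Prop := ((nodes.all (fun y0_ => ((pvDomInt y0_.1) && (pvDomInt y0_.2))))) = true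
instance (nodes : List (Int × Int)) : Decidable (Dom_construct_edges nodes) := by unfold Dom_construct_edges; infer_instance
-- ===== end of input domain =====

-- B replaces A's per-pair rescan of all islands by an adjacency index built once
-- (sorted distinct coordinates per row/column), tested in O(1) per pair.


-- ===== PORT A =====
-- helper loop 'for k in nodes: if k == nodes[i] or k == nodes[j]: continue; if …: return False;
-- return True' is nodes.all; nodes[i]/nodes[j] are pyGet? (construct_edges only calls these
-- helpers with indices in range, so the IndexError branch `| _, _ => false` is unreachable).
def vertical_bridges (i j : Int) (nodes : List (Int × Int)) : Bool :=
  match PySem.List.pyGet? nodes i, PySem.List.pyGet? nodes j with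
  | some (xi, yi), some (xj, yj) =>
    if xi ≠ xj then false
    else
      nodes.all (fun k =>
        if k == (xi, yi) || k == (xj, yj) then true
        else !(k.1 == xi && (decide (min yi yj < k.2) && decide (k.2 < max yi yj))))
  | _, _ => false

def horizontal_bridges (i j : Int) (nodes : List (Int × Int)) : Bool :=
  match PySem.List.pyGet? nodes i, PySem.List.pyGet? nodes j with
  | some (xi, yi), some (xj, yj) =>
    if yi ≠ yj then false
    else
      nodes.all (fun k =>
        if k == (xi, yi) || k == (xj, yj) then true
        else !(k.2 == yi && (decide (min xi xj < k.1) && decide (k.1 < max xi xj))))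
  | _, _ => false

def construct_edges (nodes : List (Int × Int)) : List (List Int) :=
  let n : Int := nodes.length
  (PySem.List.pyRange 0 n 1).foldl (fun edges i =>
    (PySem.List.pyRange (i + 1) n 1).foldl (fun edges j =>
      if horizontal_bridges i j nodes || vertical_bridges i j nodes then edges ++ [[i, j]]
      else edges) edges) []

-- ===== PORT B =====
-- Python's min/max on a pair of 2-tuples compares lexicographically (Lean's Prod min is
-- componentwise, so the comparison is spelled out; exact for int pairs).
def pyMinPair (a b : Int × Int) : Int × Int :=
  if a.1 < b.1 || (a.1 == b.1 && a.2 ≤ b.2) then a else b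

def pyMaxPair (a b : Int × Int) : Int × Int :=
  if a.1 < b.1 || (a.1 == b.1 && a.2 ≤ b.2) then b else a

-- rows.setdefault(y, set()).add(x) is d[y] = d.get(y, set()) with x added = Dict.modify
def construct_edges_alt (nodes : List (Int × Int)) : List (List Int) :=
  let rows : PySem.Dict Int (PySem.Set Int) :=
    nodes.foldl (fun d p => d.modify p.2 PySem.Set.empty (fun s => s.add p.1)) PySem.Dict.empty
  let cols : PySem.Dict Int (PySem.Set Int) :=
    nodes.foldl (fun d p => d.modify p.1 PySem.Set.empty (fun s => s.add p.2)) PySem.Dict.empty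
  let adj0 : PySem.Set ((Int × Int) × (Int × Int)) :=
    rows.items.foldl (fun adj yx =>
      ((PySem.List.sorted yx.2 (fun v => v)).zip (PySem.List.sorted yx.2 (fun v => v)).tail).foldl
        (fun adj ab => adj.add ((ab.1, yx.1), (ab.2, yx.1))) adj) PySem.Set.empty
  let adj : PySem.Set ((Int × Int) × (Int × Int)) :=
    cols.items.foldl (fun adj xy =>
      ((PySem.List.sorted xy.2 (fun v => v)).zip (PySem.List.sorted xy.2 (fun v => v)).tail).foldl
        (fun adj ab => adj.add ((xy.1, ab.1), (xy.1, ab.2))) adj) adj0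
  let n : Int := nodes.length
  (PySem.List.pyRange 0 n 1).foldl (fun edges i =>
    let vi := PySem.List.pyGetD nodes i (0, 0)
    (PySem.List.pyRange (i + 1) n 1).foldl (fun edges j =>
      let vj := PySem.List.pyGetD nodes j (0, 0)
      if vi == vj || adj.contains (pyMinPair vi vj, pyMaxPair vi vj) then edges ++ [[i, j]]
      else edges) edges) []

-- ===== PRECONDITION & SPEC =====
def Spec_construct_edges (nodes : List (Int × Int)) (out : List (List Int)) : Prop := out = construct_edges_alt nodes
instance (nodes : List (Int × Int)) (out : List (List Int)) : Decidable (Spec_construct_edges nodes out) := by unfold Spec_construct_edges; infer_instance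

-- ===== CLAIM (what is proved, stated in full; the proofs are below) =====
def Claim_equal_construct_edges : Prop := ∀ (nodes : List (Int × Int)), Dom_construct_edges nodes → Spec_construct_edges nodes (construct_edges nodes)

-- ===== LEMMAS AND PROOFS =====

-- the two dictionaries and the adjacency set of B, as standalone definitions
-- (definitionally the let-bound rows / cols / adj of the port)
def rowsD (nodes : List (Int × Int)) : PySem.Dict Int (PySem.Set Int) :=
  nodes.foldl (fun d p => d.modify p.2 PySem.Set.empty (fun s => s.add p.1)) PySem.Dict.empty

def colsD (nodes : List (Int × Int)) : PySem.Dict Int (PySem.Set Int) :=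
  nodes.foldl (fun d p => d.modify p.1 PySem.Set.empty (fun s => s.add p.2)) PySem.Dict.empty

def adjOf (nodes : List (Int × Int)) : PySem.Set ((Int × Int) × (Int × Int)) :=
  ((colsD nodes).items).foldl
    (fun adj xy =>
      ((PySem.List.sorted xy.2 (fun v => v)).zip (PySem.List.sorted xy.2 (fun v => v)).tail).foldl
        (fun adj ab => adj.add ((xy.1, ab.1), (xy.1, ab.2))) adj)
    (((rowsD nodes).items).foldl
      (fun adj yx =>
        ((PySem.List.sorted yx.2 (fun v => v)).zip (PySem.List.sorted yx.2 (fun v => v)).tail).foldl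
          (fun adj ab => adj.add ((ab.1, yx.1), (ab.2, yx.1))) adj) PySem.Set.empty)

-- what membership in B's adjacency set means in terms of the input
def adjOfMem (nodes : List (Int × Int)) (p : (Int × Int) × (Int × Int)) : Prop :=
  (∃ u w y, p = ((u, y), (w, y)) ∧ (u, y) ∈ nodes ∧ (w, y) ∈ nodes ∧ u < w ∧
    ∀ c, (c, y) ∈ nodes → ¬(u < c ∧ c < w)) ∨
  (∃ x u w, p = ((x, u), (x, w)) ∧ (x, u) ∈ nodes ∧ (x, w) ∈ nodes ∧ u < w ∧
    ∀ c, (x, c) ∈ nodes → ¬(u < c ∧ c < w))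

-- the x-coordinates of the nodes lying in row y (with multiplicity, in order); likewise columns
def rowXs (nodes : List (Int × Int)) (y : Int) : List Int :=
  (nodes.filter (fun p => p.2 == y)).map (·.1)

def colYs (nodes : List (Int × Int)) (x : Int) : List Int :=
  (nodes.filter (fun p => p.1 == x)).map (·.2)

theorem mem_rowXs (nodes : List (Int × Int)) (y c : Int) : c ∈ rowXs nodes y ↔ (c, y) ∈ nodes := by
  simp only [rowXs, List.mem_map, List.mem_filter, beq_iff_eq]
  constructor
  · rintro ⟨p, ⟨hp, h2⟩, h1⟩; cases p; simp_all
  · intro h; exact ⟨(c, y), ⟨h, rfl⟩, rfl⟩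

theorem mem_colYs (nodes : List (Int × Int)) (x c : Int) : c ∈ colYs nodes x ↔ (x, c) ∈ nodes := by
  simp only [colYs, List.mem_map, List.mem_filter, beq_iff_eq]
  constructor
  · rintro ⟨p, ⟨hp, h2⟩, h1⟩; cases p; simp_all
  · intro h; exact ⟨(x, c), ⟨h, rfl⟩, rfl⟩

-- content of the rows / cols dictionaries
theorem rowsD_getD (nodes : List (Int × Int)) (d : PySem.Dict Int (PySem.Set Int)) (y : Int) :
    ((nodes.foldl (fun d p => d.modify p.2 PySem.Set.empty (fun s => s.add p.1)) d).getD y PySem.Set.empty)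
      = PySem.Set.update (d.getD y PySem.Set.empty) (rowXs nodes y) := by
  induction nodes generalizing d with
  | nil => simp [rowXs, PySem.Set.update]
  | cons p rest ih =>
    simp only [List.foldl_cons, ih, rowXs, List.filter_cons]
    by_cases h : p.2 = y
    · simp [h, PySem.Set.update_cons]
    · have hb : (p.2 == y) = false := by simp [h]
      simp [hb, PySem.Dict.getD_modify, Ne.symm h]

theorem colsD_getD (nodes : List (Int × Int)) (d : PySem.Dict Int (PySem.Set Int)) (x : Int) :
    ((nodes.foldl (fun d p => d.modify p.1 PySem.Set.empty (fun s => s.add p.2)) d).getD x PySem.Set.empty)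
      = PySem.Set.update (d.getD x PySem.Set.empty) (colYs nodes x) := by
  induction nodes generalizing d with
  | nil => simp [colYs, PySem.Set.update]
  | cons p rest ih =>
    simp only [List.foldl_cons, ih, colYs, List.filter_cons]
    by_cases h : p.1 = x
    · simp [h, PySem.Set.update_cons]
    · have hb : (p.1 == x) = false := by simp [h]
      simp [hb, PySem.Dict.getD_modify, Ne.symm h]

theorem rowsD_keys (nodes : List (Int × Int)) :
    (rowsD nodes).keys = PySem.Set.ofList (nodes.map (·.2)) := by
  have h := PySem.Dict.keys_foldl_modify_key nodes (fun p : Int × Int => p.2) PySem.Set.empty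
    (fun _ p => fun s => PySem.Set.add s p.1) PySem.Dict.empty
  simpa [rowsD, PySem.Dict.keys_empty, PySem.Set.update_empty] using h

theorem colsD_keys (nodes : List (Int × Int)) :
    (colsD nodes).keys = PySem.Set.ofList (nodes.map (·.1)) := by
  have h := PySem.Dict.keys_foldl_modify_key nodes (fun p : Int × Int => p.1) PySem.Set.empty
    (fun _ p => fun s => PySem.Set.add s p.2) PySem.Dict.empty
  simpa [colsD, PySem.Dict.keys_empty, PySem.Set.update_empty] using h

theorem rowsD_keys_nodup (nodes : List (Int × Int)) : (rowsD nodes).keys.Nodup :=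
  PySem.Dict.nodup_keys_foldl_modify_key nodes (fun p : Int × Int => p.2) PySem.Set.empty
    (fun _ p => fun s => PySem.Set.add s p.1) PySem.Dict.empty (by simp [PySem.Dict.keys_empty])

theorem colsD_keys_nodup (nodes : List (Int × Int)) : (colsD nodes).keys.Nodup :=
  PySem.Dict.nodup_keys_foldl_modify_key nodes (fun p : Int × Int => p.1) PySem.Set.empty
    (fun _ p => fun s => PySem.Set.add s p.2) PySem.Dict.empty (by simp [PySem.Dict.keys_empty])

theorem rowsD_items (nodes : List (Int × Int)) :
    (rowsD nodes).items
      = (PySem.Set.ofList (nodes.map (·.2))).map (fun y => (y, PySem.Set.ofList (rowXs nodes y))) := by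
  rw [PySem.Dict.items_eq_map_keys (rowsD nodes) (rowsD_keys_nodup nodes) PySem.Set.empty, rowsD_keys]
  refine List.map_congr_left (fun y _ => ?_)
  have h := rowsD_getD nodes PySem.Dict.empty y
  rw [show (rowsD nodes).getD y PySem.Set.empty
      = PySem.Set.update (PySem.Dict.empty.getD y PySem.Set.empty) (rowXs nodes y) from h]
  simp [PySem.Dict.getD_empty, PySem.Set.update_nil_left]

theorem colsD_items (nodes : List (Int × Int)) :
    (colsD nodes).items
      = (PySem.Set.ofList (nodes.map (·.1))).map (fun x => (x, PySem.Set.ofList (colYs nodes x))) := by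
  rw [PySem.Dict.items_eq_map_keys (colsD nodes) (colsD_keys_nodup nodes) PySem.Set.empty, colsD_keys]
  refine List.map_congr_left (fun x _ => ?_)
  have h := colsD_getD nodes PySem.Dict.empty x
  rw [show (colsD nodes).getD x PySem.Set.empty
      = PySem.Set.update (PySem.Dict.empty.getD x PySem.Set.empty) (colYs nodes x) from h]
  simp [PySem.Dict.getD_empty, PySem.Set.update_nil_left]

-- membership through the nested add-loop building adj
theorem mem_foldl_foldl_add {α β γ : Type} [BEq γ] [LawfulBEq γ] (l : List α)
    (inner : α → List β) (g : α → β → γ) (s : PySem.Set γ) (p : γ) :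
    p ∈ l.foldl (fun s a => (inner a).foldl (fun s b => s.add (g a b)) s) s
      ↔ p ∈ s ∨ ∃ a ∈ l, ∃ b ∈ inner a, p = g a b := by
  induction l generalizing s with
  | nil => simp
  | cons a rest ih =>
    simp only [List.foldl_cons, ih, PySem.Set.mem_foldl_add]
    constructor
    · rintro (⟨h | ⟨b, hb, rfl⟩⟩ | ⟨a', ha', b, hb, rfl⟩)
      · exact Or.inl h
      · exact Or.inr ⟨a, by simp, b, hb, rfl⟩
      · exact Or.inr ⟨a', by simp [ha'], b, hb, rfl⟩
    · rintro (h | ⟨a', ha', b, hb, rfl⟩)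
      · exact Or.inl (Or.inl h)
      · rcases List.mem_cons.mp ha' with rfl | ha'
        · exact Or.inl (Or.inr ⟨b, hb, rfl⟩)
        · exact Or.inr ⟨a', ha', b, hb, rfl⟩

-- consecutive in a strictly increasing list = both present, ordered, nothing strictly between
theorem mem_zip_tail_iff (L : List Int) (h : L.Pairwise (· < ·)) (a b : Int) :
    (a, b) ∈ L.zip L.tail ↔ a ∈ L ∧ b ∈ L ∧ a < b ∧ ∀ c ∈ L, ¬(a < c ∧ c < b) := by
  induction L with
  | nil => simp
  | cons x t ih =>
    cases t with
    | nil =>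
      simp only [List.tail_cons, List.zip_nil_right, List.not_mem_nil, false_iff,
        List.mem_singleton]
      rintro ⟨rfl, rfl, hlt, -⟩; exact absurd hlt (lt_irrefl _)
    | cons u t' =>
      rw [List.pairwise_cons] at h
      obtain ⟨hx, hp⟩ := h
      have hu : ∀ c ∈ t', u < c := (List.pairwise_cons.mp hp).1
      have ih' := ih hp
      simp only [List.tail_cons] at ih' ⊢
      rw [List.zip_cons_cons, List.mem_cons, ih', Prod.mk.injEq]
      constructor
      · rintro (⟨rfl, rfl⟩ | ⟨ha, hb, hab, hno⟩)
        · refine ⟨by simp, by simp, hx _ (by simp), ?_⟩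
          rintro c hc ⟨h1, h2⟩
          rcases List.mem_cons.mp hc with rfl | hc
          · exact absurd h1 (lt_irrefl _)
          rcases List.mem_cons.mp hc with rfl | hc
          · exact absurd h2 (lt_irrefl _)
          · have := hu c hc; omega
        · refine ⟨List.mem_cons_of_mem _ ha, List.mem_cons_of_mem _ hb, hab, ?_⟩
          rintro c hc hcb
          rcases List.mem_cons.mp hc with rfl | hc
          · have := hx a ha; omega
          · exact hno c hc hcb
      · rintro ⟨ha, hb, hab, hno⟩
        rcases List.mem_cons.mp ha with rfl | ha2
        · rcases List.mem_cons.mp hb with rfl | hb2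
          · omega
          rcases List.mem_cons.mp hb2 with rfl | hb3
          · exact Or.inl ⟨rfl, rfl⟩
          · exact absurd ⟨hx _ (by simp), hu b hb3⟩ (hno _ (by simp))
        · rcases List.mem_cons.mp hb with rfl | hb2
          · have := hx a ha2; omega
          · exact Or.inr ⟨ha2, hb2, hab, fun c hc => hno c (List.mem_cons_of_mem _ hc)⟩

theorem mem_sorted_rowXs (nodes : List (Int × Int)) (y c : Int) :
    c ∈ PySem.List.sorted (PySem.Set.ofList (rowXs nodes y)) (fun v => v) ↔ (c, y) ∈ nodes := by
  rw [PySem.List.mem_sorted, PySem.Set.mem_ofList, mem_rowXs]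

theorem mem_sorted_colYs (nodes : List (Int × Int)) (x c : Int) :
    c ∈ PySem.List.sorted (PySem.Set.ofList (colYs nodes x)) (fun v => v) ↔ (x, c) ∈ nodes := by
  rw [PySem.List.mem_sorted, PySem.Set.mem_ofList, mem_colYs]

theorem mem_adjOf (nodes : List (Int × Int)) (p : (Int × Int) × (Int × Int)) :
    p ∈ adjOf nodes ↔ adjOfMem nodes p := by
  unfold adjOf adjOfMem
  rw [mem_foldl_foldl_add ((colsD nodes).items)
      (fun xy => (PySem.List.sorted xy.2 (fun v => v)).zip (PySem.List.sorted xy.2 (fun v => v)).tail)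
      (fun xy ab => ((xy.1, ab.1), (xy.1, ab.2))) _ p,
    mem_foldl_foldl_add ((rowsD nodes).items)
      (fun yx => (PySem.List.sorted yx.2 (fun v => v)).zip (PySem.List.sorted yx.2 (fun v => v)).tail)
      (fun yx ab => ((ab.1, yx.1), (ab.2, yx.1))) PySem.Set.empty p,
    rowsD_items, colsD_items]
  constructor
  · rintro ((h | ⟨yx, hyx, ab, hab, rfl⟩) | ⟨xy, hxy, ab, hab, rfl⟩)
    · simp at h
    · left
      obtain ⟨y, _, rfl⟩ := List.mem_map.mp hyx
      have hpw := PySem.List.sorted_ofList_pairwise_lt (rowXs nodes y)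
      obtain ⟨a, b⟩ := ab
      rw [mem_zip_tail_iff _ hpw] at hab
      obtain ⟨ha, hb, hlt, hno⟩ := hab
      exact ⟨a, b, y, rfl, (mem_sorted_rowXs nodes y a).mp ha, (mem_sorted_rowXs nodes y b).mp hb,
        hlt, fun c hc => hno c ((mem_sorted_rowXs nodes y c).mpr hc)⟩
    · right
      obtain ⟨x, _, rfl⟩ := List.mem_map.mp hxy
      have hpw := PySem.List.sorted_ofList_pairwise_lt (colYs nodes x)
      obtain ⟨a, b⟩ := ab
      rw [mem_zip_tail_iff _ hpw] at hab
      obtain ⟨ha, hb, hlt, hno⟩ := hab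
      exact ⟨x, a, b, rfl, (mem_sorted_colYs nodes x a).mp ha, (mem_sorted_colYs nodes x b).mp hb,
        hlt, fun c hc => hno c ((mem_sorted_colYs nodes x c).mpr hc)⟩
  · rintro (⟨u, w, y, rfl, hu, hw, hlt, hno⟩ | ⟨x, u, w, rfl, hu, hw, hlt, hno⟩)
    · refine Or.inl (Or.inr ?_)
      refine ⟨(y, PySem.Set.ofList (rowXs nodes y)), List.mem_map.mpr ⟨y, ?_, rfl⟩, (u, w), ?_, rfl⟩
      · rw [PySem.Set.mem_ofList]
        exact List.mem_map.mpr ⟨(u, y), hu, rfl⟩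
      · rw [mem_zip_tail_iff _ (PySem.List.sorted_ofList_pairwise_lt (rowXs nodes y))]
        exact ⟨(mem_sorted_rowXs nodes y u).mpr hu, (mem_sorted_rowXs nodes y w).mpr hw, hlt,
          fun c hc => hno c ((mem_sorted_rowXs nodes y c).mp hc)⟩
    · refine Or.inr ?_
      refine ⟨(x, PySem.Set.ofList (colYs nodes x)), List.mem_map.mpr ⟨x, ?_, rfl⟩, (u, w), ?_, rfl⟩
      · rw [PySem.Set.mem_ofList]
        exact List.mem_map.mpr ⟨(x, u), hu, rfl⟩
      · rw [mem_zip_tail_iff _ (PySem.List.sorted_ofList_pairwise_lt (colYs nodes x))]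
        exact ⟨(mem_sorted_colYs nodes x u).mpr hu, (mem_sorted_colYs nodes x w).mpr hw, hlt,
          fun c hc => hno c ((mem_sorted_colYs nodes x c).mp hc)⟩

-- the helpers of A in value form (the skipped endpoints can never satisfy the strict
-- betweenness test, so the 'continue' clause drops out)
theorem horizontal_bridges_eq (i j : Int) (nodes : List (Int × Int)) (vi vj : Int × Int)
    (hi : PySem.List.pyGet? nodes i = some vi) (hj : PySem.List.pyGet? nodes j = some vj) :
    horizontal_bridges i j nodes
      = (decide (vi.2 = vj.2) &&
          nodes.all (fun k => !(k.2 == vi.2 && (decide (min vi.1 vj.1 < k.1) && decide (k.1 < max vi.1 vj.1))))) := by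
  obtain ⟨xi, yi⟩ := vi
  obtain ⟨xj, yj⟩ := vj
  simp only [horizontal_bridges, hi, hj]
  by_cases hy : yi = yj
  · subst hy
    simp only [ne_eq, not_true_eq_false, if_false, decide_true, Bool.true_and]
    refine congrArg (List.all nodes) (funext fun k => ?_)
    by_cases hk : k == (xi, yi) || k == (xj, yi)
    · rw [if_pos hk]
      rcases Bool.or_eq_true_iff.mp hk with h | h
      all_goals
        have hk' : k = _ := eq_of_beq h
        subst hk'
        symm
        simp only [Bool.not_eq_true', Bool.and_eq_false_iff, decide_eq_false_iff_not, not_lt,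
          beq_eq_false_iff_ne, ne_eq]
        omega
    · rw [if_neg hk]
  · simp [hy]

theorem vertical_bridges_eq (i j : Int) (nodes : List (Int × Int)) (vi vj : Int × Int)
    (hi : PySem.List.pyGet? nodes i = some vi) (hj : PySem.List.pyGet? nodes j = some vj) :
    vertical_bridges i j nodes
      = (decide (vi.1 = vj.1) &&
          nodes.all (fun k => !(k.1 == vi.1 && (decide (min vi.2 vj.2 < k.2) && decide (k.2 < max vi.2 vj.2))))) := by
  obtain ⟨xi, yi⟩ := vi
  obtain ⟨xj, yj⟩ := vj
  simp only [vertical_bridges, hi, hj]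
  by_cases hx : xi = xj
  · subst hx
    simp only [ne_eq, not_true_eq_false, if_false, decide_true, Bool.true_and]
    refine congrArg (List.all nodes) (funext fun k => ?_)
    by_cases hk : k == (xi, yi) || k == (xi, yj)
    · rw [if_pos hk]
      rcases Bool.or_eq_true_iff.mp hk with h | h
      all_goals
        have hk' : k = _ := eq_of_beq h
        subst hk'
        symm
        simp only [Bool.not_eq_true', Bool.and_eq_false_iff, decide_eq_false_iff_not, not_lt,
          beq_eq_false_iff_ne, ne_eq]
        omega
    · rw [if_neg hk]
  · simp [hx]

-- Python's lexicographic tuple min/max along a shared row / column / in general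
theorem pyMin_col (x yi yj : Int) : pyMinPair (x, yi) (x, yj) = (x, min yi yj) := by
  simp only [pyMinPair]; split_ifs with h <;> (simp_all; try omega)

theorem pyMax_col (x yi yj : Int) : pyMaxPair (x, yi) (x, yj) = (x, max yi yj) := by
  simp only [pyMaxPair]; split_ifs with h <;> (simp_all; try omega)

theorem pyMin_row (xi xj y : Int) : pyMinPair (xi, y) (xj, y) = (min xi xj, y) := by
  simp only [pyMinPair]; split_ifs with h <;> (simp_all; try omega)

theorem pyMax_row (xi xj y : Int) : pyMaxPair (xi, y) (xj, y) = (max xi xj, y) := by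
  simp only [pyMaxPair]; split_ifs with h <;> (simp_all; try omega)

theorem pyMinMax_cases (a b : Int × Int) :
    (pyMinPair a b = a ∧ pyMaxPair a b = b) ∨ (pyMinPair a b = b ∧ pyMaxPair a b = a) := by
  simp only [pyMinPair, pyMaxPair]; split_ifs <;> simp

-- the heart of the equivalence: A's "same line and unobstructed" test on the two island
-- values agrees with B's "equal or adjacent in the sorted line" test
theorem value_iff (nodes : List (Int × Int)) (xi yi xj yj : Int)
    (hmi : (xi, yi) ∈ nodes) (hmj : (xj, yj) ∈ nodes) :
    ((yi = yj ∧ ∀ k ∈ nodes, ¬(k.2 = yi ∧ min xi xj < k.1 ∧ k.1 < max xi xj)) ∨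
     (xi = xj ∧ ∀ k ∈ nodes, ¬(k.1 = xi ∧ min yi yj < k.2 ∧ k.2 < max yi yj)))
    ↔ ((xi, yi) = (xj, yj) ∨
        adjOfMem nodes (pyMinPair (xi, yi) (xj, yj), pyMaxPair (xi, yi) (xj, yj))) := by
  unfold adjOfMem
  rcases eq_or_ne xi xj with rfl | hx
  · rcases eq_or_ne yi yj with rfl | hy
    · exact iff_of_true (Or.inr ⟨rfl, fun k _ h => by omega⟩) (Or.inl rfl)
    · rw [pyMin_col, pyMax_col]
      constructor
      · rintro (⟨hy', -⟩ | ⟨-, hall⟩)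
        · exact absurd hy' hy
        · refine Or.inr (Or.inr ⟨xi, min yi yj, max yi yj, rfl, ?_, ?_, by omega, ?_⟩)
          · rcases le_total yi yj with h | h
            · rwa [min_eq_left h]
            · rwa [min_eq_right h]
          · rcases le_total yi yj with h | h
            · rwa [max_eq_right h]
            · rwa [max_eq_left h]
          · rintro c hc ⟨h1, h2⟩
            exact hall (xi, c) hc ⟨rfl, h1, h2⟩
      · rintro (heq | (⟨u, w, y, hp, -, -, huw, -⟩ | ⟨x, u, w, hp, -, -, -, hno⟩))
        · exact absurd (congrArg Prod.snd heq) hy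
        · exfalso
          have e1 : min yi yj = y := congrArg (Prod.snd ∘ Prod.fst) hp
          have e2 : max yi yj = y := congrArg (Prod.snd ∘ Prod.snd) hp
          omega
        · have e0 : x = xi := (congrArg (Prod.fst ∘ Prod.fst) hp).symm
          have e1 : min yi yj = u := congrArg (Prod.snd ∘ Prod.fst) hp
          have e2 : max yi yj = w := congrArg (Prod.snd ∘ Prod.snd) hp
          subst e0; subst e1; subst e2
          refine Or.inr ⟨rfl, ?_⟩
          rintro k hk ⟨hk1, hk2, hk3⟩
          obtain ⟨kx, ky⟩ := k
          simp only at hk1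
          subst hk1
          exact hno ky hk ⟨hk2, hk3⟩
  · rcases eq_or_ne yi yj with rfl | hy
    · rw [pyMin_row, pyMax_row]
      constructor
      · rintro (⟨-, hall⟩ | ⟨hx', -⟩)
        · refine Or.inr (Or.inl ⟨min xi xj, max xi xj, yi, rfl, ?_, ?_, by omega, ?_⟩)
          · rcases le_total xi xj with h | h
            · rwa [min_eq_left h]
            · rwa [min_eq_right h]
          · rcases le_total xi xj with h | h
            · rwa [max_eq_right h]
            · rwa [max_eq_left h]
          · rintro c hc ⟨h1, h2⟩
            exact hall (c, yi) hc ⟨rfl, h1, h2⟩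
        · exact absurd hx' hx
      · rintro (heq | (⟨u, w, y, hp, -, -, -, hno⟩ | ⟨x, u, w, hp, -, -, huw, -⟩))
        · exact absurd (congrArg Prod.fst heq) hx
        · have e0 : y = yi := (congrArg (Prod.snd ∘ Prod.fst) hp).symm
          have e1 : min xi xj = u := congrArg (Prod.fst ∘ Prod.fst) hp
          have e2 : max xi xj = w := congrArg (Prod.fst ∘ Prod.snd) hp
          subst e0; subst e1; subst e2
          refine Or.inl ⟨rfl, ?_⟩
          rintro k hk ⟨hk1, hk2, hk3⟩
          obtain ⟨kx, ky⟩ := k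
          simp only at hk1
          subst hk1
          exact hno kx hk ⟨hk2, hk3⟩
        · exfalso
          have e1 : min xi xj = x := congrArg (Prod.fst ∘ Prod.fst) hp
          have e2 : max xi xj = x := congrArg (Prod.fst ∘ Prod.snd) hp
          omega
    · constructor
      · rintro (⟨hy', -⟩ | ⟨hx', -⟩)
        · exact absurd hy' hy
        · exact absurd hx' hx
      · rintro (heq | hmem)
        · exact absurd (congrArg Prod.fst heq) hx
        · exfalso
          rcases pyMinMax_cases (xi, yi) (xj, yj) with ⟨e1, e2⟩ | ⟨e1, e2⟩ <;>
            rw [e1, e2] at hmem <;>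
            rcases hmem with ⟨u, w, y, hp, -⟩ | ⟨x, u, w, hp, -⟩
          · exact hy ((congrArg (Prod.snd ∘ Prod.fst) hp).trans (congrArg (Prod.snd ∘ Prod.snd) hp).symm)
          · exact hx ((congrArg (Prod.fst ∘ Prod.fst) hp).trans (congrArg (Prod.fst ∘ Prod.snd) hp).symm)
          · exact hy (((congrArg (Prod.snd ∘ Prod.fst) hp).trans (congrArg (Prod.snd ∘ Prod.snd) hp).symm).symm)
          · exact hx (((congrArg (Prod.fst ∘ Prod.fst) hp).trans (congrArg (Prod.fst ∘ Prod.snd) hp).symm).symm)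

-- Bool ↔ Prop bridges for the obstruction scans
theorem all_not_row (nodes : List (Int × Int)) (yi a b : Int) :
    (nodes.all (fun k => !(k.2 == yi && (decide (a < k.1) && decide (k.1 < b)))) = true)
      ↔ ∀ k ∈ nodes, ¬(k.2 = yi ∧ a < k.1 ∧ k.1 < b) := by
  simp only [List.all_eq_true, Bool.not_eq_true', Bool.and_eq_false_iff,
    decide_eq_false_iff_not, not_lt, beq_eq_false_iff_ne, ne_eq]
  constructor
  · intro h k hk
    rcases h k hk with h1 | h1 | h1 <;> omega
  · intro h k hk
    have := h k hk
    by_cases h2 : k.2 = yi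
    · right; omega
    · exact Or.inl h2

theorem all_not_col (nodes : List (Int × Int)) (xi a b : Int) :
    (nodes.all (fun k => !(k.1 == xi && (decide (a < k.2) && decide (k.2 < b)))) = true)
      ↔ ∀ k ∈ nodes, ¬(k.1 = xi ∧ a < k.2 ∧ k.2 < b) := by
  simp only [List.all_eq_true, Bool.not_eq_true', Bool.and_eq_false_iff,
    decide_eq_false_iff_not, not_lt, beq_eq_false_iff_ne, ne_eq]
  constructor
  · intro h k hk
    rcases h k hk with h1 | h1 | h1 <;> omega
  · intro h k hk
    have := h k hk
    by_cases h2 : k.1 = xi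
    · right; omega
    · exact Or.inl h2

-- the pointwise equivalence of the two pair tests
theorem point_eq (nodes : List (Int × Int)) (i j : Int) (vi vj : Int × Int)
    (hi : PySem.List.pyGet? nodes i = some vi) (hj : PySem.List.pyGet? nodes j = some vj)
    (hmi : vi ∈ nodes) (hmj : vj ∈ nodes) :
    (horizontal_bridges i j nodes || vertical_bridges i j nodes)
      = (vi == vj || PySem.Set.contains (adjOf nodes) (pyMinPair vi vj, pyMaxPair vi vj)) := by
  obtain ⟨xi, yi⟩ := vi
  obtain ⟨xj, yj⟩ := vj
  rw [horizontal_bridges_eq i j nodes (xi, yi) (xj, yj) hi hj,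
    vertical_bridges_eq i j nodes (xi, yi) (xj, yj) hi hj, Bool.eq_iff_iff]
  simp only [Bool.or_eq_true, Bool.and_eq_true, decide_eq_true_eq, beq_iff_eq,
    all_not_row, all_not_col]
  rw [PySem.Set.contains_iff, mem_adjOf]
  exact value_iff nodes xi yi xj yj hmi hmj

-- the two ports written as their top-level folds
theorem construct_edges_unfold (nodes : List (Int × Int)) :
    construct_edges nodes
      = (PySem.List.pyRange 0 (nodes.length : Int) 1).foldl (fun edges i =>
          (PySem.List.pyRange (i + 1) (nodes.length : Int) 1).foldl (fun edges j =>
            if horizontal_bridges i j nodes || vertical_bridges i j nodes then edges ++ [[i, j]]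
            else edges) edges) [] := rfl

theorem construct_edges_alt_unfold (nodes : List (Int × Int)) :
    construct_edges_alt nodes
      = (PySem.List.pyRange 0 (nodes.length : Int) 1).foldl (fun edges i =>
          (PySem.List.pyRange (i + 1) (nodes.length : Int) 1).foldl (fun edges j =>
            if (PySem.List.pyGetD nodes i (0, 0) == PySem.List.pyGetD nodes j (0, 0)
                || (adjOf nodes).contains
                    (pyMinPair (PySem.List.pyGetD nodes i (0, 0)) (PySem.List.pyGetD nodes j (0, 0)),
                     pyMaxPair (PySem.List.pyGetD nodes i (0, 0)) (PySem.List.pyGetD nodes j (0, 0))))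
            then edges ++ [[i, j]] else edges) edges) [] := rfl

-- ===== VERDICT (by name: the statement is the Claim_ definition above) =====
theorem construct_edges_spec : Claim_equal_construct_edges := by
  intro nodes _
  show construct_edges nodes = construct_edges_alt nodes
  rw [construct_edges_unfold, construct_edges_alt_unfold]
  apply PySem.List.foldl_congr_mem
  intro acc i hi
  apply PySem.List.foldl_congr_mem
  intro acc2 j hj
  obtain ⟨hi0, hin⟩ := PySem.List.mem_pyRange_one.mp hi
  obtain ⟨hj0, hjn⟩ := PySem.List.mem_pyRange_one.mp hj
  have hilt : i.toNat < nodes.length := by omega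
  have hjlt : j.toNat < nodes.length := by omega
  have hgi : PySem.List.pyGet? nodes i = some nodes[i.toNat] := by
    rw [PySem.List.pyGet?_of_nonneg_of_lt nodes hi0 (by omega)]
    exact List.getElem?_eq_getElem hilt
  have hgj : PySem.List.pyGet? nodes j = some nodes[j.toNat] := by
    rw [PySem.List.pyGet?_of_nonneg_of_lt nodes (by omega) (by omega)]
    exact List.getElem?_eq_getElem hjlt
  rw [PySem.List.pyGetD_eq_getElem nodes (0, 0) hi0 (by omega),
    PySem.List.pyGetD_eq_getElem nodes (0, 0) (by omega) (by omega),
    point_eq nodes i j nodes[i.toNat] nodes[j.toNat] hgi hgj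
      (List.getElem_mem hilt) (List.getElem_mem hjlt)]
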